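-- pv_equiv track=rewrite | github.com/honest0623-ship-it/KiChul | app.py | _apply_manual_order
-- ===== SOURCE A (Python) =====
-- from typing import Any, Dict, List
--
-- def _apply_manual_order(
--     selected_problem_ids: List[str],
--     manual_order_ids: List[str],
-- ) -> tuple[List[str], List[str]]:
--     selected_set = set(selected_problem_ids)
--     ordered: List[str] = []
--     seen = set()
--     missing: List[str] = []
--
--     for problem_id in manual_order_ids:
--         if problem_id in selected_set:
--             if problem_id in seen:
--                 continue
--             seen.add(problem_id)
--             ordered.append(problem_id)
--             continue
--         missing.append(problem_id)
--
--     for problem_id in selected_problem_ids: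
--         if problem_id in seen:
--             continue
--         ordered.append(problem_id)
--
--     return ordered, missing
-- ===== SOURCE B (Python) =====
-- from typing import List
--
--
-- def _apply_manual_order(
--     selected_problem_ids: List[str],
--     manual_order_ids: List[str],
-- ) -> tuple[List[str], List[str]]:
--     # Rank every manual id by its first position; sort the ids common to both
--     # lists by that rank instead of scanning manual with a seen-set.
--     rank = {}
--     for i, m in enumerate(manual_order_ids):
--         rank.setdefault(m, i)
--     selected_set = set(selected_problem_ids)
--     missing = [m for m in manual_order_ids if m not in selected_set]
--     head = sorted({p for p in selected_problem_ids if p in rank},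
--                   key=rank.__getitem__)
--     tail = [p for p in selected_problem_ids if p not in rank]
--     return head + tail, missing
-- ===== Notes on version B (the rewrite author's own statement) =====
-- stated objective: alternative
-- what changed: Replaces A's seen-set scan of manual_order_ids with a rank dictionary (first position of each manual id) and obtains the head by sorting the ids common to both lists by that rank; the tail and missing parts are membership filters against the rank dict / selected set.
import Mathlib
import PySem

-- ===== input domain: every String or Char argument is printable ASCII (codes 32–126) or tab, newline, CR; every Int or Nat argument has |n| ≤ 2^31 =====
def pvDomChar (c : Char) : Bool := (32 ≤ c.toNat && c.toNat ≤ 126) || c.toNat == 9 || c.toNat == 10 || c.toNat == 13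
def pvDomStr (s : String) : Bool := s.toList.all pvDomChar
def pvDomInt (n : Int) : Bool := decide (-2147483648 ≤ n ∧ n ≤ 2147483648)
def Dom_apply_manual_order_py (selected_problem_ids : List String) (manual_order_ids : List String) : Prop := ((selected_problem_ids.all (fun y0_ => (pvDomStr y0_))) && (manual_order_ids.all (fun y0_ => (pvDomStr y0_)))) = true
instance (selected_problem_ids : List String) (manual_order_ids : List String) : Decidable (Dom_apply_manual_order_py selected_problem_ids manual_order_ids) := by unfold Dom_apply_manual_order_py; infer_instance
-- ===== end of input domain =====

-- B replaces A's seen-set scan with a first-position rank dictionary and sorts the common ids by rank; objective: alternative.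

-- ===== PORT A =====
-- literal port of A: one fold over manual_order_ids carrying (ordered, seen, missing),
-- then a fold over selected_problem_ids appending ids not in seen.
def apply_manual_order_py (selected_problem_ids : List String) (manual_order_ids : List String) : List String × List String :=
  let selected_set : PySem.Set String := PySem.Set.ofList selected_problem_ids
  let st := manual_order_ids.foldl
    (fun (st : List String × PySem.Set String × List String) pid =>
      if selected_set.contains pid then
        if st.2.1.contains pid then st
        else (st.1 ++ [pid], st.2.1.add pid, st.2.2)
      else (st.1, st.2.1, st.2.2 ++ [pid]))
    ([], PySem.Set.empty, [])
  let ordered := selected_problem_ids.foldl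
    (fun ord pid => if st.2.1.contains pid then ord else ord ++ [pid]) st.1
  (ordered, st.2.2)

-- ===== PORT B =====
-- port of Source B: build the rank dict with setdefault over enumerate, filter missing/tail by
-- membership, and sort the set of common ids by rank.  rank.__getitem__ is only applied to
-- ids that are keys of rank, so porting it as getD with default 0 is exact there.
def apply_manual_order_py_alt (selected_problem_ids : List String) (manual_order_ids : List String) : List String × List String :=
  let rank : PySem.Dict String Int :=
    (PySem.List.enumerate manual_order_ids).foldl (fun d p => d.setdefault p.2 p.1) PySem.Dict.empty
  let selected_set : PySem.Set String := PySem.Set.ofList selected_problem_ids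
  let missing := manual_order_ids.filter (fun m => !selected_set.contains m)
  let head := PySem.List.sorted
    (PySem.Set.ofList (selected_problem_ids.filter (fun p => rank.contains p)))
    (fun p => rank.getD p 0)
  let tail := selected_problem_ids.filter (fun p => !rank.contains p)
  (head ++ tail, missing)

-- ===== PRECONDITION & SPEC =====
def Spec_apply_manual_order_py (selected_problem_ids : List String) (manual_order_ids : List String) (out : List String × List String) : Prop := out = apply_manual_order_py_alt selected_problem_ids manual_order_ids
instance (selected_problem_ids : List String) (manual_order_ids : List String) (out : List String × List String) : Decidable (Spec_apply_manual_order_py selected_problem_ids manual_order_ids out) := by unfold Spec_apply_manual_order_py; infer_instance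

-- ===== CLAIM (what is proved, stated in full; the proofs are below) =====
def Claim_equal_apply_manual_order_py : Prop := ∀ (selected_problem_ids : List String) (manual_order_ids : List String), Dom_apply_manual_order_py selected_problem_ids manual_order_ids → Spec_apply_manual_order_py selected_problem_ids manual_order_ids (apply_manual_order_py selected_problem_ids manual_order_ids)

-- ===== LEMMAS AND PROOFS =====

-- Set.contains is membership.
theorem pv_set_contains (s : PySem.Set String) (x : String) :
    PySem.Set.contains s x = decide (x ∈ s) := by
  simp [PySem.Set.contains]

-- A's first loop: started with ordered = seen (as lists), it keeps them equal — both are the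
-- running dedup (Set.add fold) of the q-filtered prefix — and missing collects the ¬q part.
theorem pv_loop1 (q : String → Bool) (m : List String) (s : PySem.Set String) (miss : List String) :
    m.foldl
      (fun (st : List String × PySem.Set String × List String) pid =>
        if q pid then
          if st.2.1.contains pid then st
          else (st.1 ++ [pid], st.2.1.add pid, st.2.2)
        else (st.1, st.2.1, st.2.2 ++ [pid]))
      (s, s, miss)
    = ((m.filter q).foldl PySem.Set.add s, (m.filter q).foldl PySem.Set.add s,
       miss ++ m.filter (fun x => !q x)) := by
  induction m generalizing s miss with
  | nil => simp
  | cons x m ih =>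
    by_cases hq : q x = true
    · by_cases hc : PySem.Set.contains s x = true
      · have hadd : PySem.Set.add s x = s := by unfold PySem.Set.add; exact if_pos hc
        simp only [List.foldl_cons, List.filter_cons, hq, hc, if_true, Bool.not_true,
          Bool.false_eq_true, if_false]
        rw [ih s miss, hadd]
      · have hc' : PySem.Set.contains s x = false := by simpa using hc
        have hadd : PySem.Set.add s x = s ++ [x] := by unfold PySem.Set.add; exact if_neg hc
        simp only [List.foldl_cons, List.filter_cons, hq, hc', if_true, Bool.not_true,
          Bool.false_eq_true, if_false]
        rw [hadd, ih (s ++ [x]) miss]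
    · have hq' : q x = false := by simpa using hq
      simp only [List.foldl_cons, List.filter_cons, hq', Bool.false_eq_true, if_false,
        Bool.not_false, if_true]
      rw [ih s (miss ++ [x])]
      simp
-- the specialised form matching A's initial state, with the dedup written as Set.ofList.
theorem pv_loop1' (q : String → Bool) (m : List String) :
    m.foldl
      (fun (st : List String × PySem.Set String × List String) pid =>
        if q pid then
          if st.2.1.contains pid then st
          else (st.1 ++ [pid], st.2.1.add pid, st.2.2)
        else (st.1, st.2.1, st.2.2 ++ [pid]))
      ([], PySem.Set.empty, [])
    = (PySem.Set.ofList (m.filter q), PySem.Set.ofList (m.filter q),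
       m.filter (fun x => !q x)) := by
  have h := pv_loop1 q m PySem.Set.empty []
  simpa [PySem.Set.ofList_eq_foldl] using h

-- A's second loop, whose test c is fixed throughout, appends exactly the (¬c)-filtered tail.
theorem pv_loop2 (c : String → Bool) (sel : List String) (acc : List String) :
    sel.foldl (fun ord pid => if c pid then ord else ord ++ [pid]) acc
    = acc ++ sel.filter (fun p => !c p) := by
  induction sel generalizing acc with
  | nil => simp
  | cons p sel ih =>
    by_cases hc : c p = true
    · simp [hc, ih]
    · have h' : c p = false := by simpa using hc
      simp [h', ih]

-- B's rank dictionary, named for the lemmas.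
def pvRank (m : List String) : PySem.Dict String Int :=
  (PySem.List.enumerate m).foldl (fun d p => d.setdefault p.2 p.1) PySem.Dict.empty

theorem pv_setdefault_eq (d : PySem.Dict String Int) (k : String) (v : Int)
    (h : d.contains k = false) : d.setdefault k v = d.insert k v := by
  have h2 := PySem.Dict.items_insert_of_not_contains d (k := k) v h
  simp only [PySem.Dict.setdefault, h, Bool.false_eq_true, if_false]
  exact congrArg PySem.Dict.mk h2.symm

theorem pvRank_append (m : List String) (x : String) :
    pvRank (m ++ [x]) = (pvRank m).setdefault x (m.length : Int) := by
  simp [pvRank, PySem.List.enumerate_append, PySem.List.enumerate_cons,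
    PySem.List.enumerate_nil, List.foldl_append]

-- rank's keys are exactly the elements of manual_order_ids.
theorem pvRank_contains (m : List String) : ∀ v : String,
    (pvRank m).contains v = decide (v ∈ m) := by
  induction m using List.reverseRecOn with
  | nil => intro v; simp [pvRank, PySem.List.enumerate_nil]
  | append_singleton m x ih =>
    intro v
    rw [pvRank_append]
    by_cases hx : (pvRank m).contains x = true
    · have hxm : x ∈ m := by have := ih x; rw [hx] at this; simpa using this.symm
      have hsd : (pvRank m).setdefault x (m.length : Int) = pvRank m := by
        simp [PySem.Dict.setdefault, hx]
      rw [hsd, ih v]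
      by_cases hv : v = x <;> by_cases hm : v ∈ m <;>
        simp_all [List.mem_append]
    · have hx' : (pvRank m).contains x = false := by simpa using hx
      rw [pv_setdefault_eq _ _ _ hx', PySem.Dict.contains_insert, ih v]
      by_cases hv : v = x <;> by_cases hm : v ∈ m <;>
        simp_all [List.mem_append]

-- rank's value at a manual id is its first index in manual_order_ids.
theorem pvRank_getD (m : List String) : ∀ v ∈ m,
    (pvRank m).getD v 0 = (List.idxOf v m : Int) := by
  induction m using List.reverseRecOn with
  | nil => intro v hv; simp at hv
  | append_singleton m x ih =>
    intro v hv
    rw [pvRank_append]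
    by_cases hx : (pvRank m).contains x = true
    · have hxm : x ∈ m := by
        have := pvRank_contains m x; rw [hx] at this; simpa using this.symm
      have hsd : (pvRank m).setdefault x (m.length : Int) = pvRank m := by
        simp [PySem.Dict.setdefault, hx]
      have hvm : v ∈ m := by
        rcases List.mem_append.mp hv with h | h
        · exact h
        · have hvx : v = x := by simpa using h
          exact hvx ▸ hxm
      rw [hsd, ih v hvm, List.idxOf_append, if_pos hvm]
    · have hx' : (pvRank m).contains x = false := by simpa using hx
      have hxm : x ∉ m := by
        have := pvRank_contains m x; rw [hx'] at this
        simpa using this.symm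
      rw [pv_setdefault_eq _ _ _ hx', PySem.Dict.getD_insert]
      by_cases hvx : v = x
      · subst hvx
        rw [if_pos rfl, List.idxOf_append, if_neg hxm]
        simp
      · have hvm : v ∈ m := by
          rcases List.mem_append.mp hv with h | h
          · exact h
          · exact absurd (by simpa using h) hvx
        rw [if_neg hvx, ih v hvm, List.idxOf_append, if_pos hvm]

-- membership in the dedup of a filter.
theorem pv_mem_dedup_filter {m : List String} {q : String → Bool} {a : String}
    (h : a ∈ PySem.Set.ofList (m.filter q)) : a ∈ m ∧ q a = true := by
  have := (PySem.Set.mem_ofList (m.filter q) a).mp h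
  exact List.mem_filter.mp this

-- lifting a first-index ordering from m to m ++ [x] on elements of m.
theorem pv_pairwise_lift (m : List String) (x : String) (l : List String)
    (hl : ∀ a ∈ l, a ∈ m)
    (h : l.Pairwise (fun a b => List.idxOf a m < List.idxOf b m)) :
    l.Pairwise (fun a b => List.idxOf a (m ++ [x]) < List.idxOf b (m ++ [x])) :=
  h.imp_of_mem (fun ha hb hr => by
    rw [List.idxOf_append, List.idxOf_append, if_pos (hl _ ha), if_pos (hl _ hb)]
    exact hr)

-- the dedup of a filter of m is listed in strictly increasing first-index order.
theorem pv_pairwise (m : List String) (q : String → Bool) :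
    (PySem.Set.ofList (m.filter q)).Pairwise
      (fun a b => List.idxOf a m < List.idxOf b m) := by
  induction m using List.reverseRecOn with
  | nil => simp
  | append_singleton m x ih =>
    rw [List.filter_append]
    by_cases hq : q x = true
    · simp only [List.filter_cons, List.filter_nil, hq, if_true]
      rw [PySem.Set.ofList_eq_foldl, List.foldl_append, ← PySem.Set.ofList_eq_foldl]
      show (PySem.Set.add (PySem.Set.ofList (m.filter q)) x).Pairwise _
      by_cases hx : x ∈ m
      · have hcx : (PySem.Set.ofList (m.filter q)).contains x = true := by
          rw [pv_set_contains]
          simp [PySem.Set.mem_ofList, List.mem_filter, hx, hq]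
        rw [show PySem.Set.add (PySem.Set.ofList (m.filter q)) x
              = PySem.Set.ofList (m.filter q) from by unfold PySem.Set.add; exact if_pos hcx]
        exact pv_pairwise_lift m x _ (fun a ha => (pv_mem_dedup_filter ha).1) ih
      · have hcx : (PySem.Set.ofList (m.filter q)).contains x = false := by
          rw [pv_set_contains]
          simp only [decide_eq_false_iff_not]
          intro hmem
          exact hx (pv_mem_dedup_filter hmem).1
        rw [show PySem.Set.add (PySem.Set.ofList (m.filter q)) x
              = PySem.Set.ofList (m.filter q) ++ [x] from by
                unfold PySem.Set.add
                exact if_neg (by rw [hcx]; exact Bool.false_ne_true)]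
        rw [List.pairwise_append]
        refine ⟨pv_pairwise_lift m x _ (fun a ha => (pv_mem_dedup_filter ha).1) ih,
          by simp, ?_⟩
        intro a ha b hb
        have hb' : b = x := by simpa using hb
        subst hb'
        have ham : a ∈ m := (pv_mem_dedup_filter ha).1
        rw [List.idxOf_append, List.idxOf_append, if_pos ham, if_neg hx]
        have : List.idxOf a m < m.length := List.idxOf_lt_length_of_mem ham
        simp
        omega
    · have hq' : q x = false := by simpa using hq
      simp only [List.filter_cons, List.filter_nil, hq', Bool.false_eq_true, if_false,
        List.append_nil]
      exact pv_pairwise_lift m x _ (fun a ha => (pv_mem_dedup_filter ha).1) ih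

-- the main equality.
theorem pv_main (sel man : List String) :
    apply_manual_order_py sel man = apply_manual_order_py_alt sel man := by
  simp only [apply_manual_order_py, apply_manual_order_py_alt]
  rw [pv_loop1' (fun pid => PySem.Set.contains (PySem.Set.ofList sel) pid) man]
  rw [pv_loop2]
  rw [show (PySem.List.enumerate man).foldl (fun d p => d.setdefault p.2 p.1) PySem.Dict.empty
        = pvRank man from rfl]
  have hSmem : ∀ a : String,
      a ∈ PySem.Set.ofList (man.filter (fun pid => PySem.Set.contains (PySem.Set.ofList sel) pid))
        ↔ a ∈ man ∧ a ∈ sel := by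
    intro a
    rw [PySem.Set.mem_ofList, List.mem_filter, pv_set_contains]
    simp [PySem.Set.mem_ofList]
  have hTmem : ∀ a : String,
      a ∈ PySem.Set.ofList (sel.filter (fun p => (pvRank man).contains p))
        ↔ a ∈ sel ∧ a ∈ man := by
    intro a
    rw [PySem.Set.mem_ofList, List.mem_filter, pvRank_contains]
    simp
  have hperm : (PySem.Set.ofList (man.filter (fun pid => PySem.Set.contains (PySem.Set.ofList sel) pid))).Perm
      (PySem.Set.ofList (sel.filter (fun p => (pvRank man).contains p))) := by
    rw [List.perm_ext_iff_of_nodup (PySem.Set.nodup_ofList _) (PySem.Set.nodup_ofList _)]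
    intro a
    rw [hSmem, hTmem]
    tauto
  have hpw : (PySem.Set.ofList (man.filter (fun pid => PySem.Set.contains (PySem.Set.ofList sel) pid))).Pairwise
      (fun a b => (pvRank man).getD a 0 < (pvRank man).getD b 0) := by
    refine (pv_pairwise man _).imp_of_mem (fun {a b} ha hb hr => ?_)
    have ham : a ∈ man := ((hSmem a).mp ha).1
    have hbm : b ∈ man := ((hSmem b).mp hb).1
    rw [pvRank_getD man a ham, pvRank_getD man b hbm]
    exact_mod_cast hr
  rw [PySem.List.sorted_eq_of_perm_of_pairwise_lt _ _ _ hperm hpw]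
  refine Prod.ext ?_ rfl
  show _ ++ _ = _ ++ _
  congr 1
  refine List.filter_congr (fun p hp => ?_)
  rw [pv_set_contains, pvRank_contains]
  by_cases hm : p ∈ man
  · simp [hm, hp]
  · simp [hm, hp]

-- ===== VERDICT (by name: the statement is the Claim_ definition above) =====
theorem apply_manual_order_py_spec : Claim_equal_apply_manual_order_py := by
  intro sel man _
  show apply_manual_order_py sel man = apply_manual_order_py_alt sel man
  exact pv_main sel man
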